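-- pv_equiv track=rewrite | github.com/FilatovDm/Python_START | HW_6/task_1.py | find
-- ===== SOURCE A (Python) =====
-- def find(exp, search_operand):
--     ind_start, ind_finish, ind_operand = 0, 0, 0
--     operands_full = ['*', '/', '+', '-']
--     operands = ['*', '/', '+', '-']
--     for op in search_operand:
--         operands.remove(op)
--     found = False
--     for i, sym in enumerate(exp):
--         if i == 0 and sym == '-':
--             continue
--         if not found and sym in operands:
--             ind_start = i + 1
--         elif found and sym in operands_full:
--             ind_finish = i - 1
--             return ind_start, ind_finish, ind_operand
--         elif sym in search_operand:
--             found = True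
--             ind_operand = i
--             ind_finish = len(exp) - 1
--     return ind_start, ind_finish, ind_operand
-- ===== SOURCE B (Python) =====
-- def find(exp, search_operand):
--     others = ['*', '/', '+', '-']
--     for op in search_operand:
--         others.remove(op)
--     full = ['*', '/', '+', '-']
--     n = len(exp)
--     if exp[:1] == '-':
--         head, body = 1, exp[1:]
--     else:
--         head, body = 0, exp
--     # phase 1: split at the first searched operator
--     ind_operand = None
--     rest = ''
--     for k, ch in enumerate(body):
--         if ch in search_operand:
--             ind_operand = head + k
--             rest = body[k + 1:]
--             break
--     # phase 2: last 'other' operator strictly before the operand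
--     ind_start = 0
--     stop = n if ind_operand is None else ind_operand
--     for k, ch in enumerate(body):
--         i = head + k
--         if stop <= i:
--             break
--         if ch in others:
--             ind_start = i + 1
--     if ind_operand is None:
--         return ind_start, 0, 0
--     # phase 3: the first operator after the operand ends it
--     ind_finish = n - 1
--     for k, ch in enumerate(rest):
--         if ch in full:
--             ind_finish = ind_operand + k
--             break
--     return ind_start, ind_finish, ind_operand
-- ===== Notes on version B (the rewrite author's own statement) =====
-- stated objective: alternative
-- what changed: Replaces A's single flag-driven enumerate loop with three separate phase scans: locate the first searched operator (skipping a leading '-'), then scan for the last 'other' operator before it, then for the first operator after it.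
import Mathlib
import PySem

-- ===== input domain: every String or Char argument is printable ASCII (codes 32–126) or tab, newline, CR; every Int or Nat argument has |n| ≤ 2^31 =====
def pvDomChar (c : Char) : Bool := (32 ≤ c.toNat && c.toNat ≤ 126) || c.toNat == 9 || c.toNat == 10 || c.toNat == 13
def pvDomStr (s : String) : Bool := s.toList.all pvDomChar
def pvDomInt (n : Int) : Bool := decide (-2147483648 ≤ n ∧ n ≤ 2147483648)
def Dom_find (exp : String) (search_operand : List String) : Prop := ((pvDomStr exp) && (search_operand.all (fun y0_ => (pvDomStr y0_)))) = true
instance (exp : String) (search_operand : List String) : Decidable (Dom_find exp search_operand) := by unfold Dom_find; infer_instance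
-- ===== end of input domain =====

-- B replaces A's single flag-driven loop by three separate phase scans (locate operand,
-- last prior 'other' operator, first following operator); same cost, plainer decomposition.

-- ===== PORT A =====
-- the 'for op in search_operand: operands.remove(op)' prelude (shared verbatim by A and B);
-- none = the ValueError Python raises, excluded by Pre_find
def pvRemoveAll (base : List String) (ops : List String) : Option (List String) :=
  match ops with
  | [] => some base
  | op :: rest =>
    match PySem.List.remove? base op with
    | none => none
    | some b => pvRemoveAll b rest

-- A's single enumerate loop, state (ind_start, ind_finish, ind_operand, found)
def findLoopA (l : List Char) (i : Int) (others full sops : List String)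
    (indStart indFinish indOperand : Int) (found : Bool) (n : Int) : Int × Int × Int :=
  match l with
  | [] => (indStart, indFinish, indOperand)
  | c :: rest =>
    let s := String.mk [c]
    if i = 0 ∧ c = '-' then
      findLoopA rest (i + 1) others full sops indStart indFinish indOperand found n
    else if found = false ∧ s ∈ others then
      findLoopA rest (i + 1) others full sops (i + 1) indFinish indOperand found n
    else if found = true ∧ s ∈ full then
      (indStart, i - 1, indOperand)
    else if s ∈ sops then
      findLoopA rest (i + 1) others full sops indStart (n - 1) i true n
    else
      findLoopA rest (i + 1) others full sops indStart indFinish indOperand found n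

def find (exp : String) (search_operand : List String) : Int × Int × Int :=
  match pvRemoveAll ["*", "/", "+", "-"] search_operand with
  | none => (0, 0, 0)  -- Python raises ValueError here; outside Pre_find
  | some operands =>
    findLoopA exp.toList 0 operands ["*", "/", "+", "-"] search_operand 0 0 0 false
      (exp.toList.length : Int)

-- ===== PORT B =====
-- phase 1: first index (from i) whose char is a searched operator, plus the rest after it
def bScanOperand (l : List Char) (i : Int) (sops : List String) : Option (Int × List Char) :=
  match l with
  | [] => none
  | c :: rest =>
    if String.mk [c] ∈ sops then some (i, rest) else bScanOperand rest (i + 1) sops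

-- phase 2: 1 + index of the last 'other' operator at an index < stop, default acc
def bScanStart (l : List Char) (i stop : Int) (others : List String) (acc : Int) : Int :=
  match l with
  | [] => acc
  | c :: rest =>
    if stop ≤ i then acc
    else bScanStart rest (i + 1) stop others (if String.mk [c] ∈ others then i + 1 else acc)

-- phase 3: first operator in the rest (rest starts at index i) ends the operand, default dflt
def bScanFinish (l : List Char) (i : Int) (full : List String) (dflt : Int) : Int :=
  match l with
  | [] => dflt
  | c :: rest => if String.mk [c] ∈ full then i - 1 else bScanFinish rest (i + 1) full dflt

def find_alt (exp : String) (search_operand : List String) : Int × Int × Int :=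
  match pvRemoveAll ["*", "/", "+", "-"] search_operand with
  | none => (0, 0, 0)  -- Python raises ValueError here; outside Pre_find
  | some others =>
    let full : List String := ["*", "/", "+", "-"]
    let l := exp.toList
    let n : Int := (l.length : Int)
    let hb : Int × List Char := match l with
      | [] => (0, [])
      | c :: rest => if c = '-' then (1, rest) else (0, c :: rest)
    match bScanOperand hb.2 hb.1 search_operand with
    | none => (bScanStart hb.2 hb.1 n others 0, 0, 0)
    | some (io, rest) =>
      (bScanStart hb.2 hb.1 io others 0, bScanFinish rest (io + 1) full (n - 1), io)

-- ===== PRECONDITION & SPEC =====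
-- Pre_find excludes exactly the inputs where the 'operands.remove(op)' prelude raises
-- ValueError (a search operand that is not one of '*','/','+','-', or listed twice);
-- both A and B raise there.
def Pre_find (exp : String) (search_operand : List String) : Prop :=
  search_operand.Nodup ∧ ∀ op ∈ search_operand, op ∈ (["*", "/", "+", "-"] : List String)
instance (exp : String) (search_operand : List String) : Decidable (Pre_find exp search_operand) := by
  unfold Pre_find; infer_instance

def pvWitness_find : String × List String := ("-12*3+4", ["*"])

def Spec_find (exp : String) (search_operand : List String) (out : Int × Int × Int) : Prop := out = find_alt exp search_operand
instance (exp : String) (search_operand : List String) (out : Int × Int × Int) : Decidable (Spec_find exp search_operand out) := by unfold Spec_find; infer_instance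

-- ===== CLAIM (what is proved, stated in full; the proofs are below) =====
def Claim_equal_find : Prop := ∀ (exp : String) (search_operand : List String), Dom_find exp search_operand → Pre_find exp search_operand → Spec_find exp search_operand (find exp search_operand)

-- ===== LEMMAS AND PROOFS =====

theorem bScanOperand_le (l : List Char) (i : Int) (sops : List String) (io : Int)
    (rest : List Char) (h : bScanOperand l i sops = some (io, rest)) : i ≤ io := by
  induction l generalizing i with
  | nil => simp [bScanOperand] at h
  | cons c tl ih =>
    simp only [bScanOperand] at h
    split at h
    · simp_all
    · have := ih (i + 1) h; omega

-- found phase of A = phase 3 of B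
theorem loopA_found (others full sops : List String)
    (hsub : ∀ s ∈ sops, s ∈ full) (n : Int) :
    ∀ (l : List Char) (i indStart indOperand : Int), 1 ≤ i →
    findLoopA l i others full sops indStart (n - 1) indOperand true n
      = (indStart, bScanFinish l i full (n - 1), indOperand) := by
  intro l
  induction l with
  | nil => intro i a b _; simp [findLoopA, bScanFinish]
  | cons c rest ih =>
    intro i indStart indOperand hi
    simp only [findLoopA, bScanFinish]
    have h0 : ¬ (i = 0 ∧ c = '-') := by rintro ⟨h, _⟩; omega
    rw [if_neg h0, if_neg (by simp)]
    by_cases hf : String.mk [c] ∈ full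
    · rw [if_pos (by exact ⟨by trivial, hf⟩), if_pos hf]
    · rw [if_neg (by simp [hf]), if_neg hf,
        if_neg (fun hs => hf (hsub _ hs)), ih (i + 1) _ _ (by omega)]

-- not-yet-found phase of A = B's phases 1/2 glued together
theorem loopA_main (others full sops : List String)
    (hsub : ∀ s ∈ sops, s ∈ full)
    (hdisj : ∀ s ∈ others, s ∉ sops) (n : Int) :
    ∀ (l : List Char) (i indStart : Int),
    0 ≤ i → (i = 0 → l.head? ≠ some '-') → i + (l.length : Int) = n →
    findLoopA l i others full sops indStart 0 0 false n
      = (match bScanOperand l i sops with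
         | none => (bScanStart l i n others indStart, 0, 0)
         | some (io, rest) =>
           (bScanStart l i io others indStart, bScanFinish rest (io + 1) full (n - 1), io)) := by
  intro l
  induction l with
  | nil => intro i a _ _ _; simp [findLoopA, bScanOperand, bScanStart]
  | cons c rest ih =>
    intro i indStart h0 hm hn
    simp only [List.length_cons] at hn
    have hlt : i < n := by push_cast at hn; omega
    simp only [findLoopA, bScanOperand, bScanStart]
    have hnm : ¬ (i = 0 ∧ c = '-') := by
      rintro ⟨h1, h2⟩; exact hm h1 (by simp [h2])
    rw [if_neg hnm]
    by_cases hs : String.mk [c] ∈ sops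
    · -- operand found here
      rw [if_neg (by rintro ⟨_, h⟩; exact hdisj _ h hs), if_neg (by simp),
        if_pos hs, if_pos hs,
        loopA_found others full sops hsub n rest (i + 1) indStart i (by omega)]
      simp
    · rw [if_neg hs]
      by_cases ho : String.mk [c] ∈ others
      · -- an 'other' operator: ind_start moves
        rw [if_pos (by exact ⟨by trivial, ho⟩),
          ih (i + 1) (i + 1) (by omega) (by omega) (by push_cast at hn ⊢; omega)]
        cases hsc : bScanOperand rest (i + 1) sops with
        | none => simp [hs, show ¬ n ≤ i by omega, ho]
        | some p =>
          obtain ⟨io, rr⟩ := p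
          have := bScanOperand_le rest (i + 1) sops io rr hsc
          simp [hs, show ¬ io ≤ i by omega, ho]
      · -- an ordinary character: nothing changes
        rw [if_neg (by simp [ho]), if_neg (by simp),
          ih (i + 1) indStart (by omega) (by omega) (by push_cast at hn ⊢; omega)]
        cases hsc : bScanOperand rest (i + 1) sops with
        | none => simp [hs, show ¬ n ≤ i by omega, ho]
        | some p =>
          obtain ⟨io, rr⟩ := p
          have := bScanOperand_le rest (i + 1) sops io rr hsc
          simp [hs, show ¬ io ≤ i by omega, ho]

-- the remove prelude yields a list disjoint from search_operand (when base is nodup)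
theorem pvRemoveAll_mem (ops : List String) :
    ∀ (base r : List String), base.Nodup → pvRemoveAll base ops = some r →
    ∀ x ∈ r, x ∈ base ∧ x ∉ ops := by
  induction ops with
  | nil =>
    intro base r _ h x hx
    simp only [pvRemoveAll, Option.some.injEq] at h
    subst h; simp [hx]
  | cons op rest ih =>
    intro base r hnd h x hx
    simp only [pvRemoveAll] at h
    cases hrm : PySem.List.remove? base op with
    | none => rw [hrm] at h; exact absurd h (by simp)
    | some b =>
      rw [hrm] at h
      have hop : op ∈ base := by
        by_contra hc
        rw [(PySem.List.remove?_eq_none_iff base op).2 hc] at hrm; exact absurd hrm (by simp)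
      rw [PySem.List.remove?_eq_some_erase base op hop] at hrm
      have hb : b = base.erase op := by injection hrm with h'; exact h'.symm
      subst hb
      have ⟨h1, h2⟩ := ih (base.erase op) r (hnd.erase op) h x hx
      have hxe := (List.Nodup.mem_erase_iff hnd).1 h1
      exact ⟨hxe.2, by simp [h2, hxe.1]⟩

-- ===== VERDICT (by name: the statement is the Claim_ definition above) =====
theorem find_spec : Claim_equal_find := by
  intro exp sops _ hpre
  obtain ⟨hnd, hsub⟩ := hpre
  unfold Spec_find find find_alt
  cases hrm : pvRemoveAll ["*", "/", "+", "-"] sops with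
  | none => rfl
  | some others =>
    have hdisj : ∀ s ∈ others, s ∉ sops := fun s hs =>
      (pvRemoveAll_mem sops _ others (by decide) hrm s hs).2
    simp only []
    cases hl : exp.toList with
    | nil => simp [findLoopA, bScanOperand, bScanStart]
    | cons c rest =>
      by_cases hc : c = '-'
      · subst hc
        simp only [findLoopA, zero_add]
        rw [if_pos (by exact ⟨by trivial, by trivial⟩),
          loopA_main others _ sops hsub hdisj _ rest 1 0 (by omega)
          (by omega) (by push_cast [List.length_cons]; omega)]
        simp
      · simp only [if_neg hc]
        rw [loopA_main others _ sops hsub hdisj _ (c :: rest) 0 0 (by omega)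
          (fun _ => by simp [hc]) (by simp)]
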